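-- pv_equiv track=rewrite | github.com/mjpatter88/aoc-2015 | day01/solver.py | solve
-- ===== SOURCE A (Python) =====
-- def solve(input_string: str) -> int:
--     floor = 0
--     for c in input_string:
--         if c == "(":
--             floor += 1
--         elif c == ")":
--             floor -= 1
--         else:
--             raise ValueError(f"Unexpected input char: {c}")
--     return floor
-- ===== SOURCE B (Python) =====
-- def solve(input_string: str) -> int:
--     bad = next((c for c in input_string if c not in "()"), None)
--     if bad is not None:
--         raise ValueError(f"Unexpected input char: {bad}")
--     return input_string.count("(") - input_string.count(")")
-- ===== Notes on version B (the rewrite author's own statement) =====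
-- stated objective: simpler
-- what changed: Replaces the per-character signed accumulation loop with a validation scan plus two closed-form str.count passes.
import Mathlib
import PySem

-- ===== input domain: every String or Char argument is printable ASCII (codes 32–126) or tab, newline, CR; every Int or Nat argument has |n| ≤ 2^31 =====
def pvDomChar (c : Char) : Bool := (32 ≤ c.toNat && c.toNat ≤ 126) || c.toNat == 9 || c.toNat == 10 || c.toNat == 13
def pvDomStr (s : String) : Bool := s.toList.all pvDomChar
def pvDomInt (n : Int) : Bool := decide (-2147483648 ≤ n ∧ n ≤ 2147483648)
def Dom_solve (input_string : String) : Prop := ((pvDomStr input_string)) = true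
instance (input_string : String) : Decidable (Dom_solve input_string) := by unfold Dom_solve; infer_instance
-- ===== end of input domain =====

-- B replaces A's per-character signed accumulation loop with a validation scan plus two closed-form count passes (objective: simpler).

-- ===== PORT A =====
-- A's loop; `none` = the ValueError on a char other than '(' / ')' (excluded by Pre_solve).
def solveLoop : List Char → Int → Option Int
  | [], floor => some floor
  | c :: rest, floor =>
    if c = '(' then solveLoop rest (floor + 1)
    else if c = ')' then solveLoop rest (floor - 1)
    else none

def solve (input_string : String) : Int :=
  (solveLoop input_string.toList 0).getD 0

-- ===== PORT B =====
-- validation scan: first char not in "()" (Python raises there; excluded by Pre_solve), then two counts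
def solve_alt (input_string : String) : Int :=
  match input_string.toList.find? (fun c => !(c == '(' || c == ')')) with
  | some _ => 0      -- B raises ValueError here (outside Pre_solve)
  | none => (PySem.Str.count input_string "(" : Int) - (PySem.Str.count input_string ")" : Int)

-- ===== PRECONDITION & SPEC =====
-- A raises ValueError on any char other than '(' or ')'; Pre_ admits exactly the strings of parens.
def Pre_solve (input_string : String) : Prop :=
  input_string.toList.all (fun c => c == '(' || c == ')') = true
instance (input_string : String) : Decidable (Pre_solve input_string) := by unfold Pre_solve; infer_instance

def pvWitness_solve : String := "(()(()))"

def Spec_solve (input_string : String) (out : Int) : Prop := out = solve_alt input_string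
instance (input_string : String) (out : Int) : Decidable (Spec_solve input_string out) := by unfold Spec_solve; infer_instance

-- ===== CLAIM (what is proved, stated in full; the proofs are below) =====
def Claim_equal_solve : Prop := ∀ (input_string : String), Dom_solve input_string → Pre_solve input_string → Spec_solve input_string (solve input_string)

-- ===== LEMMAS AND PROOFS =====

lemma count_go_singleton (c : Char) :
    ∀ (l : List Char) (fuel : Nat) (acc : Nat), l.length ≤ fuel →
      PySem.Chars.count.go [c] fuel l acc = acc + l.count c := by
  intro l
  induction l with
  | nil =>
    intro fuel acc _
    cases fuel <;> simp [PySem.Chars.count.go]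
  | cons h t ih =>
    intro fuel acc hle
    cases fuel with
    | zero => simp at hle
    | succ n =>
      simp only [PySem.Chars.count.go]
      by_cases hc : h = c
      · subst hc
        rw [if_pos (by simp [List.isPrefixOf])]
        simp only [List.length_nil, List.drop_zero, List.length_cons, List.drop_succ_cons]
        rw [ih n (acc + 1) (by simpa using hle), List.count_cons]
        simp; omega
      · rw [if_neg (by simp [List.isPrefixOf]; exact fun e => hc e.symm)]
        rw [ih n acc (by simpa using hle), List.count_cons]
        simp
        exact hc

lemma count_singleton (s : List Char) (c : Char) :
    PySem.Chars.count s [c] = s.count c := by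
  simp [PySem.Chars.count, count_go_singleton c s s.length 0 le_rfl]

lemma solveLoop_eq (l : List Char) :
    ∀ (acc : Int), l.all (fun c => c == '(' || c == ')') = true →
      solveLoop l acc = some (acc + l.count '(' - l.count ')') := by
  induction l with
  | nil => intro acc _; simp [solveLoop]
  | cons h t ih =>
    intro acc hall
    simp only [List.all_cons, Bool.and_eq_true, Bool.or_eq_true, beq_iff_eq] at hall
    rcases hall with ⟨hh, ht⟩
    rcases hh with hh | hh <;> subst hh <;>
      simp [solveLoop, ih _ ht] <;> ring

-- ===== VERDICT (by name: the statement is the Claim_ definition above) =====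
theorem solve_spec : Claim_equal_solve := by
  intro s _ hpre
  unfold Spec_solve solve solve_alt
  have hfind : s.toList.find? (fun c => !(c == '(' || c == ')')) = none := by
    rw [List.find?_eq_none]
    intro x hx
    have h2 := List.all_eq_true.mp hpre x hx
    simp at h2 ⊢
    tauto
  rw [hfind, solveLoop_eq s.toList 0 hpre]
  simp [PySem.Str.count_eq, count_singleton]
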